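-- pv_equiv track=rewrite | github.com/ASSERT-KTH/C4B_APR | data_directory/2785_problem_id/105055_author_id/Rejected.py | calc_substr
-- ===== SOURCE A (Python) =====
-- def calc_substr(s, sub):
--     """
--     >>> calc_substr('KV', 'VK')
--     0
--     >>> calc_substr('VK', 'VK')
--     1
--     >>> calc_substr('VV', 'VK')
--     1
--     >>> calc_substr('V', 'VK')
--     0
--     >>> calc_substr('VKKKKKKKKKVVVVVVVVVK', 'VK')
--     3
--     >>> calc_substr('KVKV', 'VK')
--     1
--     >>> calc_substr('VKKKK', 'VK')
--     2
--     """
--     once_changed = 0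
--     cnt = 0
--     acc = ''
--     for lit in s:
--         acc += lit
--         if 'VK' in acc:
--             cnt += 1
--             acc = ''
--         if 'KK' in acc or 'VV' in acc and not once_changed:
--             once_changed = 1
--             acc = ''
--     return cnt+once_changed
-- ===== SOURCE B (Python) =====
-- def calc_substr(s, sub):
--     prev = None
--     cnt = 0
--     once = 0
--     for c in s:
--         if prev == 'V' and c == 'K':
--             cnt += 1
--             prev = None
--         elif prev == 'K' and c == 'K':
--             once = 1
--             prev = None
--         elif prev == 'V' and c == 'V' and once == 0:
--             once = 1
--             prev = None
--         else:
--             prev = c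
--     return cnt + once
-- ===== Notes on version B (the rewrite author's own statement) =====
-- stated objective: faster
-- what changed: A rebuilds a growing accumulator string and rescans it for 'VK'/'KK'/'VV' at every character; B is a single pass keeping only the previous character (reset after a match) and the one-swap flag, so no substring scans at all.
import Mathlib
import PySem

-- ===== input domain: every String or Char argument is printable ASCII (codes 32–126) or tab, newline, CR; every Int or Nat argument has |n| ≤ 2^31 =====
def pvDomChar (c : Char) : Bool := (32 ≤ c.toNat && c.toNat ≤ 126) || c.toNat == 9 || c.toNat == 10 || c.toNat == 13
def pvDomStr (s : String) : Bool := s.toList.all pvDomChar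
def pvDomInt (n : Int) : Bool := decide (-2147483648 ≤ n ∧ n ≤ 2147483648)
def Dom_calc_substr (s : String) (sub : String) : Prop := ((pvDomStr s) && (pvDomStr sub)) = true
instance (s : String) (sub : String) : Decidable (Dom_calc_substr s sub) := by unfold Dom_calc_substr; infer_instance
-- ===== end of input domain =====

-- B replaces A's growing-accumulator substring rescans by a single pass that tracks only the
-- previous character and the one-swap flag (objective: faster; the parameter `sub` is unused by A and B alike).

-- ===== PORT A =====
-- state = (once_changed, cnt, acc); one loop iteration of A
def pvStepA (st : Int × Int × List Char) (lit : Char) : Int × Int × List Char :=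
  let acc := st.2.2 ++ [lit]
  let p := if PySem.Chars.isIn ['V', 'K'] acc then (st.2.1 + 1, ([] : List Char)) else (st.2.1, acc)
  if PySem.Chars.isIn ['K', 'K'] p.2 || (PySem.Chars.isIn ['V', 'V'] p.2 && st.1 == 0) then
    (1, p.1, ([] : List Char))
  else
    (st.1, p.1, p.2)

def calc_substr (s : String) (sub : String) : Int :=
  let st := s.toList.foldl pvStepA (0, 0, [])
  st.2.1 + st.1

-- ===== PORT B =====
-- state = (prev, cnt, once); one loop iteration of B
def pvStepB (st : Option Char × Int × Int) (c : Char) : Option Char × Int × Int :=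
  if st.1 == some 'V' && c == 'K' then (none, st.2.1 + 1, st.2.2)
  else if st.1 == some 'K' && c == 'K' then (none, st.2.1, 1)
  else if st.1 == some 'V' && c == 'V' && st.2.2 == 0 then (none, st.2.1, 1)
  else (some c, st.2.1, st.2.2)

def calc_substr_alt (s : String) (sub : String) : Int :=
  let st := s.toList.foldl pvStepB (none, 0, 0)
  st.2.1 + st.2.2

-- ===== PRECONDITION & SPEC =====
def Spec_calc_substr (s : String) (sub : String) (out : Int) : Prop := out = calc_substr_alt s sub
instance (s : String) (sub : String) (out : Int) : Decidable (Spec_calc_substr s sub out) := by unfold Spec_calc_substr; infer_instance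

-- ===== CLAIM (what is proved, stated in full; the proofs are below) =====
def Claim_equal_calc_substr : Prop := ∀ (s : String) (sub : String), Dom_calc_substr s sub → Spec_calc_substr s sub (calc_substr s sub)

-- ===== LEMMAS AND PROOFS =====

-- a length-2 pattern is an infix of l ++ [c] iff it is an infix of l or sits at the very end
theorem pvInfix2_concat (l : List Char) (c x y : Char) :
    ([x, y] <:+: l ++ [c]) ↔ ([x, y] <:+: l ∨ (l.getLast? = some x ∧ c = y)) := by
  constructor
  · rintro ⟨s, t, h⟩
    rcases t.eq_nil_or_concat with rfl | ⟨t', d, rfl⟩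
    · have h' : (s ++ [x]) ++ [y] = l ++ [c] := by simpa [List.append_assoc] using h
      obtain ⟨h1, h2⟩ := List.append_inj' h' rfl
      right
      refine ⟨?_, by simpa using h2.symm⟩
      rw [← h1]
      simp
    · have h' : (s ++ [x, y] ++ t') ++ [d] = l ++ [c] := by simpa [List.append_assoc] using h
      obtain ⟨h1, _⟩ := List.append_inj' h' rfl
      exact Or.inl ⟨s, t', h1⟩
  · rintro (h | ⟨h1, rfl⟩)
    · exact h.trans (l.prefix_append [c]).isInfix
    · obtain ⟨l', rfl⟩ := List.getLast?_eq_some_iff.mp h1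
      exact ⟨l', [], by simp⟩
  
-- the loop invariant tying A's state (once, cnt, acc) to B's state (prev, cnt, once)
def pvInv (a : Int × Int × List Char) (b : Option Char × Int × Int) : Prop :=
  a.2.1 = b.2.1 ∧ a.1 = b.2.2 ∧ b.1 = a.2.2.getLast? ∧ (a.1 = 0 ∨ a.1 = 1) ∧
  ¬ ['V', 'K'] <:+: a.2.2 ∧ ¬ ['K', 'K'] <:+: a.2.2 ∧ (a.1 = 0 → ¬ ['V', 'V'] <:+: a.2.2)

theorem pvStep_inv (a : Int × Int × List Char) (b : Option Char × Int × Int) (c : Char)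
    (h : pvInv a b) : pvInv (pvStepA a c) (pvStepB b c) := by
  obtain ⟨once, cnt, acc⟩ := a
  obtain ⟨prev, cnt', once'⟩ := b
  obtain ⟨hcnt, honce, hprev, h01, hVK, hKK, hVV⟩ := h
  simp only at hcnt honce hprev h01 hVK hKK hVV
  subst hcnt honce hprev
  have hEK : PySem.Chars.isIn ['K', 'K'] ([] : List Char) = false := by decide
  have hEV : PySem.Chars.isIn ['V', 'V'] ([] : List Char) = false := by decide
  by_cases h1 : acc.getLast? = some 'V' ∧ c = 'K'
  · obtain ⟨hL, hc⟩ := h1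
    subst hc
    have : PySem.Chars.isIn ['V', 'K'] (acc ++ ['K']) = true := by
      rw [PySem.Chars.isIn_iff_infix, pvInfix2_concat]; exact Or.inr ⟨hL, rfl⟩
    simp only [pvStepA, pvStepB, pvInv, this, hL]
    simp [hEK, hEV, h01]
  · have hA1 : PySem.Chars.isIn ['V', 'K'] (acc ++ [c]) = false := by
      rw [PySem.Chars.isIn_eq_false_iff, pvInfix2_concat]
      rintro (h | h); exact hVK h; exact h1 h
    have hB1 : (acc.getLast? == some 'V' && c == 'K') = false := by
      rcases Bool.eq_false_or_eq_true (acc.getLast? == some 'V' && c == 'K') with h | h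
      · exact absurd ⟨by simpa using (Bool.and_eq_true _ _ |>.mp h).1,
          by simpa using (Bool.and_eq_true _ _ |>.mp h).2⟩ h1
      · exact h
    by_cases h2 : acc.getLast? = some 'K' ∧ c = 'K'
    · obtain ⟨hL, hc⟩ := h2
      subst hc
      have : PySem.Chars.isIn ['K', 'K'] (acc ++ ['K']) = true := by
        rw [PySem.Chars.isIn_iff_infix, pvInfix2_concat]; exact Or.inr ⟨hL, rfl⟩
      simp [pvStepA, pvStepB, pvInv, hA1, this, hL]
    · have hKK' : PySem.Chars.isIn ['K', 'K'] (acc ++ [c]) = false := by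
        rw [PySem.Chars.isIn_eq_false_iff, pvInfix2_concat]
        rintro (h | h); exact hKK h; exact h2 h
      have hB2 : (acc.getLast? == some 'K' && c == 'K') = false := by
        rcases Bool.eq_false_or_eq_true (acc.getLast? == some 'K' && c == 'K') with h | h
        · exact absurd ⟨by simpa using (Bool.and_eq_true _ _ |>.mp h).1,
            by simpa using (Bool.and_eq_true _ _ |>.mp h).2⟩ h2
        · exact h
      by_cases honce0 : once = 0
      · subst honce0
        by_cases h3 : acc.getLast? = some 'V' ∧ c = 'V'
        · obtain ⟨hL, hc⟩ := h3
          subst hc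
          have : PySem.Chars.isIn ['V', 'V'] (acc ++ ['V']) = true := by
            rw [PySem.Chars.isIn_iff_infix, pvInfix2_concat]; exact Or.inr ⟨hL, rfl⟩
          simp [pvStepA, pvStepB, pvInv, hA1, hKK', this, hL]
        · have hVV' : PySem.Chars.isIn ['V', 'V'] (acc ++ [c]) = false := by
            rw [PySem.Chars.isIn_eq_false_iff, pvInfix2_concat]
            rintro (h | h); exact hVV rfl h; exact h3 h
          have hB3 : (acc.getLast? == some 'V' && c == 'V' && (0 : Int) == 0) = false := by
            rcases Bool.eq_false_or_eq_true (acc.getLast? == some 'V' && c == 'V') with h | h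
            · exact absurd ⟨by simpa using (Bool.and_eq_true _ _ |>.mp h).1,
                by simpa using (Bool.and_eq_true _ _ |>.mp h).2⟩ h3
            · simp [h]
          have hnVK : ¬ ['V', 'K'] <:+: acc ++ [c] := by
            rw [pvInfix2_concat]; rintro (h | h); exact hVK h; exact h1 h
          have hnKK : ¬ ['K', 'K'] <:+: acc ++ [c] := by
            rw [pvInfix2_concat]; rintro (h | h); exact hKK h; exact h2 h
          have hnVV : ¬ ['V', 'V'] <:+: acc ++ [c] := by
            rw [pvInfix2_concat]; rintro (h | h); exact hVV rfl h; exact h3 h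
          simp [pvStepA, pvStepB, pvInv, hA1, hKK', hVV', hnVK, hnKK, hnVV, h1, h2, h3]
      · have honce1 : once = 1 := h01.resolve_left honce0
        subst honce1
        have h10 : ((1 : Int) == 0) = false := by decide
        have hnVK : ¬ ['V', 'K'] <:+: acc ++ [c] := by
          rw [pvInfix2_concat]; rintro (h | h); exact hVK h; exact h1 h
        have hnKK : ¬ ['K', 'K'] <:+: acc ++ [c] := by
          rw [pvInfix2_concat]; rintro (h | h); exact hKK h; exact h2 h
        simp [pvStepA, pvStepB, pvInv, hA1, hB1, hKK', hB2, h10, hnVK, hnKK]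

theorem pvFold_inv (l : List Char) (a : Int × Int × List Char) (b : Option Char × Int × Int)
    (h : pvInv a b) : pvInv (l.foldl pvStepA a) (l.foldl pvStepB b) := by
  induction l generalizing a b with
  | nil => exact h
  | cons c l ih => exact ih _ _ (pvStep_inv a b c h)

-- ===== VERDICT (by name: the statement is the Claim_ definition above) =====
theorem calc_substr_spec : Claim_equal_calc_substr := by
  intro s sub _
  simp only [Spec_calc_substr, calc_substr, calc_substr_alt]
  have h := pvFold_inv s.toList (0, 0, []) (none, 0, 0) (by simp [pvInv])
  obtain ⟨hcnt, honce, _⟩ := h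
  omega
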